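-- pv_equiv track=rewrite | github.com/LuisAlexisSalazar/cancer_detection | imgDescriptors/rilqp.py | splitPattern
-- ===== SOURCE A (Python) =====
-- def g_i(p_i, value):
--     if p_i == value:
--         return 1
--     else:
--         return 0
--
-- def splitPattern(pattern):
--     fourPattern = []
--     tempPattern = []
--     # --g1
--     for p_i in pattern:
--         tempPattern.append(g_i(p_i, 2))
--     fourPattern.append(tempPattern.copy())
--     tempPattern.clear()
--
--     # --g2
--     for p_i in pattern:
--         tempPattern.append(g_i(p_i, 1))
--     fourPattern.append(tempPattern.copy())
--     tempPattern.clear()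
--
--     # --g3
--     for p_i in pattern:
--         tempPattern.append(g_i(p_i, -1))
--     fourPattern.append(tempPattern.copy())
--     tempPattern.clear()
--
--     # --g4
--     for p_i in pattern:
--         tempPattern.append(g_i(p_i, -2))
--     fourPattern.append(tempPattern.copy())
--     tempPattern.clear()
--
--     return fourPattern
-- ===== SOURCE B (Python) =====
-- def splitPattern(pattern):
--     g2list, g1list, gm1list, gm2list = [], [], [], []
--     for x in pattern:
--         g2list.append(1 if x == 2 else 0)
--         g1list.append(1 if x == 1 else 0)
--         gm1list.append(1 if x == -1 else 0)
--         gm2list.append(1 if x == -2 else 0)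
--     return [g2list, g1list, gm1list, gm2list]
-- ===== Notes on version B (the rewrite author's own statement) =====
-- stated objective: alternative
-- what changed: B builds all four indicator lists in one pass over the pattern with four accumulators, instead of A's four separate scans through a shared temp list.
import Mathlib
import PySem

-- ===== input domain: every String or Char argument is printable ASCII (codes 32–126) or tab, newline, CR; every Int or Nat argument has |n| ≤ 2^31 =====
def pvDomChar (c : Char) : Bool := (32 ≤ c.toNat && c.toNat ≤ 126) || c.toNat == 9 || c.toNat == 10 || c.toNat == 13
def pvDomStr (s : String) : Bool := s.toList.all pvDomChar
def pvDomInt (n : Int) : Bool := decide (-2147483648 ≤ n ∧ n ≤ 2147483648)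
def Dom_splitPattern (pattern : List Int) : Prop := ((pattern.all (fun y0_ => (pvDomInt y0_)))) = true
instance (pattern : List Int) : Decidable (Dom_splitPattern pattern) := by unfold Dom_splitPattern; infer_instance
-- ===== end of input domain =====

-- ===== PORT A =====
def g_i (p_i : Int) (value : Int) : Int :=
  if p_i == value then 1 else 0

def splitPattern (pattern : List Int) : List (List Int) :=
  let fourPattern : List (List Int) := []
  let tempPattern : List Int := []
  -- --g1
  let tempPattern := pattern.foldl (fun acc p_i => acc ++ [g_i p_i 2]) tempPattern
  let fourPattern := fourPattern ++ [tempPattern]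
  let tempPattern : List Int := []
  -- --g2
  let tempPattern := pattern.foldl (fun acc p_i => acc ++ [g_i p_i 1]) tempPattern
  let fourPattern := fourPattern ++ [tempPattern]
  let tempPattern : List Int := []
  -- --g3
  let tempPattern := pattern.foldl (fun acc p_i => acc ++ [g_i p_i (-1)]) tempPattern
  let fourPattern := fourPattern ++ [tempPattern]
  let tempPattern : List Int := []
  -- --g4
  let tempPattern := pattern.foldl (fun acc p_i => acc ++ [g_i p_i (-2)]) tempPattern
  let fourPattern := fourPattern ++ [tempPattern]
  fourPattern

-- ===== PORT B =====
-- B: one pass over pattern, four accumulator lists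
def splitPattern_alt (pattern : List Int) : List (List Int) :=
  let st := pattern.foldl
    (fun (st : List Int × List Int × List Int × List Int) x =>
      (st.1 ++ [if x == 2 then 1 else 0],
       st.2.1 ++ [if x == 1 then 1 else 0],
       st.2.2.1 ++ [if x == -1 then 1 else 0],
       st.2.2.2 ++ [if x == -2 then 1 else 0]))
    ([], [], [], [])
  [st.1, st.2.1, st.2.2.1, st.2.2.2]

-- ===== PRECONDITION & SPEC =====
def Spec_splitPattern (pattern : List Int) (out : List (List Int)) : Prop := out = splitPattern_alt pattern
instance (pattern : List Int) (out : List (List Int)) : Decidable (Spec_splitPattern pattern out) := by unfold Spec_splitPattern; infer_instance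

-- ===== CLAIM (what is proved, stated in full; the proofs are below) =====
def Claim_equal_splitPattern : Prop := ∀ (pattern : List Int), Dom_splitPattern pattern → Spec_splitPattern pattern (splitPattern pattern)

-- ===== LEMMAS AND PROOFS =====

-- ===== VERDICT (by name: the statement is the Claim_ definition above) =====
-- the single-pass fold's state is the four partial lists of A's four folds
lemma alt_fold_split (pattern : List Int) (a b c d : List Int) :
    pattern.foldl
      (fun (st : List Int × List Int × List Int × List Int) x =>
        (st.1 ++ [if x == 2 then 1 else 0],
         st.2.1 ++ [if x == 1 then 1 else 0],
         st.2.2.1 ++ [if x == -1 then 1 else 0],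
         st.2.2.2 ++ [if x == -2 then 1 else 0]))
      (a, b, c, d)
    = (pattern.foldl (fun acc p_i => acc ++ [g_i p_i 2]) a,
       pattern.foldl (fun acc p_i => acc ++ [g_i p_i 1]) b,
       pattern.foldl (fun acc p_i => acc ++ [g_i p_i (-1)]) c,
       pattern.foldl (fun acc p_i => acc ++ [g_i p_i (-2)]) d) := by
  induction pattern generalizing a b c d with
  | nil => rfl
  | cons x xs ih => simp only [List.foldl_cons, ih, g_i]

theorem splitPattern_spec : Claim_equal_splitPattern := by
  intro pattern _
  unfold Spec_splitPattern splitPattern splitPattern_alt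
  simp only [alt_fold_split]
  rfl
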